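-- pv_equiv track=rewrite | github.com/legffy/CS100 | hw7/hw7_part1.py | insertL
-- ===== SOURCE A (Python) =====
-- def foundinDict(d,w):
--     if w in d:
--             return True
--     return False
--
-- def insertL(d,w):
--     #potential words
--     pW = set()
--     #creates a list of every letter in the alphabet
--     alphabet = list('abcdefghijklmnopqrstuvwxyz')
--     w = list(w)
--     #tries inserting every letter in the alphabet at each point in the word to see if it is a word
--     #converts w to a list so that the insert function can be used
--     for l in range(len(w)+1):
--         for a in alphabet:
--             word = w.copy()
--             word.insert(l,a)
--             word = ''.join(word)
--             if foundinDict(d,word):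
--                 pW.add(word)
--     return pW
-- ===== SOURCE B (Python) =====
-- # Recursive decomposition: walk the insertion point through the word as a (prefix, suffix)
-- # split and collect the dictionary words among the one-letter insertions at each split.
-- def insertL(d, w):
--     def go(pre, suf):
--         found = {pre + c + suf for c in "abcdefghijklmnopqrstuvwxyz" if pre + c + suf in d}
--         if suf:
--             found |= go(pre + suf[0], suf[1:])
--         return found
--     return go("", w)
-- ===== Notes on version B (the rewrite author's own statement) =====
-- stated objective: simpler
-- what changed: B replaces A's index loop with per-candidate list copy/insert/join by a short recursion on the (prefix, suffix) split of w, collecting the dictionary words among the one-letter insertions at each split with a set comprehension.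
import Mathlib
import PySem

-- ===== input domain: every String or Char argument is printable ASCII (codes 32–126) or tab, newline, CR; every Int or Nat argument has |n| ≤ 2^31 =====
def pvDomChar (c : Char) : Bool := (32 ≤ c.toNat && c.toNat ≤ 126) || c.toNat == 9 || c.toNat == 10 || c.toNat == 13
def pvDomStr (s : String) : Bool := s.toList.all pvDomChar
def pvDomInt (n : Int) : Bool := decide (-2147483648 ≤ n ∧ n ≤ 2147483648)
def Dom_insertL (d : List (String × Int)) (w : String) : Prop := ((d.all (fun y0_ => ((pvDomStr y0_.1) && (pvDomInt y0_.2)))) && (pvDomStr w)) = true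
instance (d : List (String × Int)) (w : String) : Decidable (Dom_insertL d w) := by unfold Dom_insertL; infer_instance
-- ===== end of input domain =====

-- B collects the same insertion candidates by recursing on the (prefix, suffix) split of w
-- instead of A's index loop with per-candidate list copy/insert/join: a simpler decomposition,
-- similar cost.

-- ===== PORT A =====
def foundinDict (d : List (String × Int)) (w : String) : Bool :=
  -- Python 'w in d' on a dict: membership among the keys
  if d.any (fun p => p.1 == w) then true else false

def insertL (d : List (String × Int)) (w : String) : List String :=
  let pW : PySem.Set String := PySem.Set.empty
  let alphabet : List Char := "abcdefghijklmnopqrstuvwxyz".toList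
  let wl : List Char := w.toList
  (PySem.List.pyRange 0 (PySem.List.len wl + 1) 1).foldl (fun pW l =>
    alphabet.foldl (fun pW a =>
      let word := PySem.List.insert wl l a
      let word' := String.ofList word   -- ''.join(word): the character list joined back (exact)
      if foundinDict d word' then PySem.Set.add pW word' else pW) pW) pW

-- ===== PORT B =====
-- strings are carried as their character lists; concatenation pre + c + suf is
-- String.ofList (pre ++ c :: suf) (exact)
def inDictB (d : List (String × Int)) (x : String) : Bool :=
  d.any (fun p => p.1 == x)

def insertLgo (d : List (String × Int)) : List Char → List Char → PySem.Set String
  | pre, [] =>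
    PySem.Set.ofList
      (("abcdefghijklmnopqrstuvwxyz".toList.filter
          (fun c => inDictB d (String.ofList (pre ++ c :: [])))).map
        (fun c => String.ofList (pre ++ c :: [])))
  | pre, c0 :: rest =>
    let found := PySem.Set.ofList
      (("abcdefghijklmnopqrstuvwxyz".toList.filter
          (fun c => inDictB d (String.ofList (pre ++ c :: (c0 :: rest))))).map
        (fun c => String.ofList (pre ++ c :: (c0 :: rest))))
    PySem.Set.union found (insertLgo d (pre ++ [c0]) rest)

def insertL_alt (d : List (String × Int)) (w : String) : List String :=
  insertLgo d [] w.toList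

-- ===== PRECONDITION & SPEC =====
def Spec_insertL (d : List (String × Int)) (w : String) (out : List String) : Prop := out = insertL_alt d w
instance (d : List (String × Int)) (w : String) (out : List String) : Decidable (Spec_insertL d w out) := by unfold Spec_insertL; infer_instance

-- ===== CLAIM (what is proved, stated in full; the proofs are below) =====
def Claim_equal_insertL : Prop := ∀ (d : List (String × Int)) (w : String), Dom_insertL d w → Spec_insertL d w (insertL d w)

-- ===== LEMMAS AND PROOFS =====

-- proof-side abbreviations
def pvAbc : List Char := "abcdefghijklmnopqrstuvwxyz".toList
def pvCand (wl : List Char) (k : Nat) (c : Char) : String := String.ofList (wl.take k ++ c :: wl.drop k)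
def pvHere (d : List (String × Int)) (pre suf : List Char) : List String :=
  (pvAbc.filter (fun a => foundinDict d (String.ofList (pre ++ a :: suf)))).map
    (fun a => String.ofList (pre ++ a :: suf))
def pvCands (d : List (String × Int)) : List Char → List Char → List String
  | pre, [] => pvHere d pre []
  | pre, c0 :: rest => pvHere d pre (c0 :: rest) ++ pvCands d (pre ++ [c0]) rest
def pvLAp (d : List (String × Int)) (wl : List Char) : List (Int × String) :=
  (List.range (wl.length + 1)).flatMap (fun k =>
    ((PySem.List.enumerate pvAbc 0).filter (fun jc => foundinDict d (pvCand wl k jc.2))).map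
      (fun jc => (26 * (k : Int) + jc.1, pvCand wl k jc.2)))

-- A in normal form
theorem pvFoldlUpdate (C : Nat → List String) :
    ∀ (L : List Nat) (s : PySem.Set String),
      L.foldl (fun s k => PySem.Set.update s (C k)) s = PySem.Set.update s (L.flatMap C) := by
  intro L
  induction L with
  | nil => intro s; simp [PySem.Set.update_nil]
  | cons k L' ih =>
    intro s
    simp only [List.foldl_cons, List.flatMap_cons]
    rw [ih, PySem.Set.update_append]

theorem pvEnumFilterSnd (p : Char → Bool) :
    ((PySem.List.enumerate pvAbc 0).filter (fun jc => p jc.2)).map (·.2) = pvAbc.filter p := by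
  conv_rhs => rw [← PySem.List.map_snd_enumerate pvAbc 0, List.filter_map]
  rfl

theorem pvLAp_snd_eq (d : List (String × Int)) (wl : List Char) :
    (pvLAp d wl).map (·.2) =
      (List.range (wl.length + 1)).flatMap (fun k =>
        (pvAbc.filter (fun a => foundinDict d (pvCand wl k a))).map (pvCand wl k)) := by
  rw [pvLAp, List.map_flatMap]
  congr 1
  funext k
  rw [List.map_map, ← pvEnumFilterSnd (fun a => foundinDict d (pvCand wl k a)), List.map_map]
  rfl

theorem pvA_eq (d : List (String × Int)) (w : String) :
    insertL d w = PySem.Set.ofList ((pvLAp d w.toList).map (·.2)) := by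
  simp only [insertL]
  rw [PySem.List.len_eq, PySem.List.pyRange_one]
  rw [show (((w.toList.length : Int) + 1 - 0).toNat) = w.toList.length + 1 by omega]
  rw [List.foldl_map]
  refine .trans (PySem.List.foldl_congr_mem _ _
    (fun pW k => PySem.Set.update pW
      ((pvAbc.filter (fun a => foundinDict d (pvCand w.toList k a))).map (pvCand w.toList k))) _ ?_) ?_
  · intro pW k hk
    have hk' : k ≤ w.toList.length := by
      have := List.mem_range.mp hk; omega
    show ("abcdefghijklmnopqrstuvwxyz".toList).foldl _ pW = _
    have hins : ∀ a : Char,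
        String.ofList (PySem.List.insert w.toList ((0 : Int) + (k : Int)) a) = pvCand w.toList k a := by
      intro a
      rw [show ((0 : Int) + (k : Int)) = (k : Int) by ring]
      rw [PySem.List.insert_natCast w.toList k a hk']
      rfl
    simp only [hins]
    rw [PySem.List.foldl_if_eq_foldl_filter (p := fun a => foundinDict d (pvCand w.toList k a))
      (f := fun pW a => PySem.Set.add pW (pvCand w.toList k a))]
    rw [← PySem.Set.update_map_eq_foldl_add]
    rfl
  · rw [pvFoldlUpdate, pvLAp_snd_eq]
    exact PySem.Set.update_nil_left _

-- B in normal form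
theorem pvInDictB_eq (d : List (String × Int)) (x : String) : inDictB d x = foundinDict d x := by
  simp [inDictB, foundinDict]

theorem pvUpdate_ofList {α : Type} [BEq α] [LawfulBEq α] (s : PySem.Set α) (ys : List α) :
    PySem.Set.update s (PySem.Set.ofList ys) = PySem.Set.update s ys := by
  rw [PySem.Set.update_eq_append_filter, PySem.Set.update_eq_append_filter,
    PySem.Set.ofList_ofList]

theorem pvUnion_ofList {α : Type} [BEq α] [LawfulBEq α] (xs ys : List α) :
    PySem.Set.union (PySem.Set.ofList xs) (PySem.Set.ofList ys) = PySem.Set.ofList (xs ++ ys) := by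
  show PySem.Set.update (PySem.Set.ofList xs) (PySem.Set.ofList ys) = _
  rw [pvUpdate_ofList, PySem.Set.ofList_append]

theorem pvGo_eq (d : List (String × Int)) :
    ∀ (suf pre : List Char), insertLgo d pre suf = PySem.Set.ofList (pvCands d pre suf) := by
  intro suf
  induction suf with
  | nil =>
    intro pre
    simp only [insertLgo, pvCands, pvHere, pvAbc, pvInDictB_eq]
  | cons c0 rest ih =>
    intro pre
    show PySem.Set.union _ _ = _
    rw [ih (pre ++ [c0])]
    simp only [pvCands, pvInDictB_eq, pvUnion_ofList, pvHere, pvAbc]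

theorem pvCands_eq (d : List (String × Int)) :
    ∀ (suf pre : List Char),
      pvCands d pre suf = (List.range (suf.length + 1)).flatMap (fun k =>
        pvHere d (pre ++ suf.take k) (suf.drop k)) := by
  intro suf
  induction suf with
  | nil =>
    intro pre
    simp [pvCands]
  | cons c0 rest ih =>
    intro pre
    show pvHere d pre (c0 :: rest) ++ pvCands d (pre ++ [c0]) rest = _
    rw [ih (pre ++ [c0])]
    conv_rhs => rw [List.length_cons, List.range_succ_eq_map, List.flatMap_cons, List.flatMap_map]
    congr 1
    · simp
    · congr 1
      funext k
      simp [List.append_assoc]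

theorem pvCands_base (d : List (String × Int)) (wl : List Char) :
    pvCands d [] wl = (pvLAp d wl).map (·.2) := by
  have h : (fun k => pvHere d ([] ++ List.take k wl) (List.drop k wl))
      = (fun k => (pvAbc.filter (fun a => foundinDict d (pvCand wl k a))).map (pvCand wl k)) := by
    funext k
    simp [pvHere, pvCand]
  rw [pvCands_eq, pvLAp_snd_eq, h]

theorem pvMain (d : List (String × Int)) (w : String) : insertL d w = insertL_alt d w := by
  rw [pvA_eq, insertL_alt, pvGo_eq, pvCands_base]

-- ===== VERDICT (by name: the statement is the Claim_ definition above) =====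
theorem insertL_spec : Claim_equal_insertL := by
  intro d w _
  unfold Spec_insertL
  exact pvMain d w
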